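-- pv_equiv track=rewrite | github.com/foksly/feedback-learning | something-in-the-way/env/field.py | _build_bridge
-- ===== SOURCE A (Python) =====
-- def _build_bridge(coord, field, pattern, value):
--     """
--     coord is the first bridge cell
--     bridge should be in format 'rdr' - right, down, right
--     """
--     hints = [(coord[0], coord[1] - 1, 'R')]
--
--     field[coord[0]][coord[1]] = value
--     for direction in pattern:
--         hints.append((coord[0], coord[1], direction.upper()))
--         if direction.upper() == 'R':
--             coord[1] += 1
--         elif direction.upper() == 'L':
--             coord[1] -= 1
--         elif direction.upper() == 'D':
--             coord[0] += 1
--         elif direction.upper() == 'U':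
--             coord[0] -= 1
--
--         field[coord[0]][coord[1]] = value
--
--     hints.append((coord[0], coord[1], 'R'))
--     return hints
-- ===== SOURCE B (Python) =====
-- def _build_bridge(coord, field, pattern, value):
--     DELTAS = {'R': (0, 1), 'L': (0, -1), 'D': (1, 0), 'U': (-1, 0)}
--     ups = [d.upper() for d in pattern]
--     # pass 1: build the whole path of cell coordinates
--     path = [(coord[0], coord[1])]
--     for u in ups:
--         dr, dc = DELTAS.get(u, (0, 0))
--         r, c = path[-1]
--         path.append((r + dr, c + dc))
--     # pass 2: emit the hints from the path
--     hints = ([(path[0][0], path[0][1] - 1, 'R')]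
--              + [(path[i][0], path[i][1], ups[i]) for i in range(len(ups))]
--              + [(path[-1][0], path[-1][1], 'R')])
--     # reproduce the in-place effects: fill the field along the path, move coord
--     for r, c in path:
--         field[r][c] = value
--     coord[0], coord[1] = path[-1]
--     return hints
-- ===== Notes on version B (the rewrite author's own statement) =====
-- stated objective: alternative
-- what changed: B first builds the full path of coordinates by folding a delta table, then emits all hints in a second pass (leading hint :: zip(path, uppercased pattern) ++ trailing hint) and fills the field from the path list, instead of A's single loop that interleaves hint-appending, coordinate mutation and field writes.
import Mathlib
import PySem

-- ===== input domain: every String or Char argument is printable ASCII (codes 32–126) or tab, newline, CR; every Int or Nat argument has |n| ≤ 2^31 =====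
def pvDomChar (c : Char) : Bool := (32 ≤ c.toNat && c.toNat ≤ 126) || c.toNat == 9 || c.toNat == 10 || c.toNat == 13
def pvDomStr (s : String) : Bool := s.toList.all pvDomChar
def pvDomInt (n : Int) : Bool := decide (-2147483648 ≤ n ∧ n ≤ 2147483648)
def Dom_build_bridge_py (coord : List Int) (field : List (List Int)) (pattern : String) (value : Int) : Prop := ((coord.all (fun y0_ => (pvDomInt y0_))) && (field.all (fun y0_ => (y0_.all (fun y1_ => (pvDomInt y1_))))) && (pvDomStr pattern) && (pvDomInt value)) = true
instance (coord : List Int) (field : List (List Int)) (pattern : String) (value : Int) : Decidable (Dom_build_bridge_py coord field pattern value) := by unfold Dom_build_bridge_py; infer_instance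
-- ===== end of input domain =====

-- B builds the whole path first, then emits all hints in one second pass; A interleaves everything
-- in one loop. A mutates coord and field in place (B performs the same mutations in Python); the
-- equivalence proved here is about the RETURN value (the hints list) only.

-- ===== PORT A =====
-- loop body of A's 'for direction in pattern' (state: coord[0], coord[1], hints)
def pvStepA (s : Int × Int × List (Int × Int × String)) (direction : Char) :
    Int × Int × List (Int × Int × String) :=
  let u := PySem.Chars.upperChar direction
  let hints := s.2.2 ++ [(s.1, s.2.1, String.mk [u])]
  if u = 'R' then (s.1, s.2.1 + 1, hints)
  else if u = 'L' then (s.1, s.2.1 - 1, hints)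
  else if u = 'D' then (s.1 + 1, s.2.1, hints)
  else if u = 'U' then (s.1 - 1, s.2.1, hints)
  else (s.1, s.2.1, hints)

-- field writes cannot change the returned hints, so the (in-place) field mutation is not modelled
def build_bridge_py (coord : List Int) (field : List (List Int)) (pattern : String) (value : Int) : List (Int × Int × String) :=
  let r0 := PySem.List.pyGetD coord 0 0
  let c0 := PySem.List.pyGetD coord 1 0
  let st := pattern.toList.foldl pvStepA (r0, c0, [(r0, c0 - 1, "R")])
  st.2.2 ++ [(st.1, st.2.1, "R")]

-- ===== PORT B =====
-- B's delta table (DELTAS.get(u, (0, 0)))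
def pvDelta (u : Char) : Int × Int :=
  if u = 'R' then (0, 1)
  else if u = 'L' then (0, -1)
  else if u = 'D' then (1, 0)
  else if u = 'U' then (-1, 0)
  else (0, 0)

def pvMove (p : Int × Int) (u : Char) : Int × Int :=
  (p.1 + (pvDelta u).1, p.2 + (pvDelta u).2)

-- as in the header: field writes / coord update are in-place effects, not part of the return value
def build_bridge_py_alt (coord : List Int) (field : List (List Int)) (pattern : String) (value : Int) : List (Int × Int × String) :=
  let start : Int × Int := (PySem.List.pyGetD coord 0 0, PySem.List.pyGetD coord 1 0)
  let ups := pattern.toList.map PySem.Chars.upperChar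
  let path := ups.scanl pvMove start
  ((start.1, start.2 - 1, "R") :: List.zipWith (fun p u => (p.1, p.2, String.mk [u])) path ups)
    ++ [((path.getLastD start).1, (path.getLastD start).2, "R")]

-- ===== PRECONDITION & SPEC =====
-- positions A writes to (prefix sums of the direction deltas), used only to state where A raises
def pvPrePath (start : Int × Int) (ds : List Char) : List (Int × Int) :=
  (ds.map PySem.Chars.upperChar).scanl
    (fun p u =>
      if u = 'R' then (p.1, p.2 + 1)
      else if u = 'L' then (p.1, p.2 - 1)
      else if u = 'D' then (p.1 + 1, p.2)
      else if u = 'U' then (p.1 - 1, p.2)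
      else p) start

def pvCellOk (field : List (List Int)) (p : Int × Int) : Bool :=
  match PySem.List.pyGet? field p.1 with
  | some row => decide (PySem.Raise.InRange row.length p.2)
  | none => false

-- Pre_ = exactly where Python A returns: coord has the two read entries, and every cell the
-- bridge visits is a valid (possibly negative, Python-style) index into field (else IndexError).
def Pre_build_bridge_py (coord : List Int) (field : List (List Int)) (pattern : String) (value : Int) : Prop :=
  2 ≤ coord.length ∧
  (pvPrePath (PySem.List.pyGetD coord 0 0, PySem.List.pyGetD coord 1 0) pattern.toList).all
    (pvCellOk field) = true
instance (coord : List Int) (field : List (List Int)) (pattern : String) (value : Int) : Decidable (Pre_build_bridge_py coord field pattern value) := by unfold Pre_build_bridge_py; infer_instance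

def pvWitness_build_bridge_py : List Int × List (List Int) × String × Int :=
  ([0, 1], [[0, 0, 0], [0, 0, 0]], "rd", 7)

def Spec_build_bridge_py (coord : List Int) (field : List (List Int)) (pattern : String) (value : Int) (out : List (Int × Int × String)) : Prop := out = build_bridge_py_alt coord field pattern value
instance (coord : List Int) (field : List (List Int)) (pattern : String) (value : Int) (out : List (Int × Int × String)) : Decidable (Spec_build_bridge_py coord field pattern value out) := by unfold Spec_build_bridge_py; infer_instance

-- ===== CLAIM (what is proved, stated in full; the proofs are below) =====
def Claim_equal_build_bridge_py : Prop := ∀ (coord : List Int) (field : List (List Int)) (pattern : String) (value : Int), Dom_build_bridge_py coord field pattern value → Pre_build_bridge_py coord field pattern value → Spec_build_bridge_py coord field pattern value (build_bridge_py coord field pattern value)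

-- ===== LEMMAS AND PROOFS =====

-- A's if-chain moves the coordinate by exactly B's delta
theorem pvStepA_eq (s : Int × Int × List (Int × Int × String)) (d : Char) :
    pvStepA s d =
      ((pvMove (s.1, s.2.1) (PySem.Chars.upperChar d)).1,
       (pvMove (s.1, s.2.1) (PySem.Chars.upperChar d)).2,
       s.2.2 ++ [(s.1, s.2.1, String.mk [PySem.Chars.upperChar d])]) := by
  simp only [pvStepA, pvMove, pvDelta]
  split_ifs <;> simp [sub_eq_add_neg]

-- A's loop, characterised by B's path
theorem pvLoopA (ds : List Char) (r c : Int) (h : List (Int × Int × String)) :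
    ds.foldl pvStepA (r, c, h) =
      ((((ds.map PySem.Chars.upperChar).scanl pvMove (r, c)).getLastD (r, c)).1,
       (((ds.map PySem.Chars.upperChar).scanl pvMove (r, c)).getLastD (r, c)).2,
       h ++ List.zipWith (fun p u => (p.1, p.2, String.mk [u]))
         ((ds.map PySem.Chars.upperChar).scanl pvMove (r, c))
         (ds.map PySem.Chars.upperChar)) := by
  induction ds generalizing r c h with
  | nil => simp
  | cons d ds ih =>
    rw [List.foldl_cons, pvStepA_eq]
    rw [ih]
    simp only [List.map_cons, List.scanl_cons, List.zipWith_cons_cons,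
      List.getLastD_cons, List.append_assoc, List.singleton_append, Prod.mk.eta]
    have hne : List.scanl pvMove (pvMove (r, c) (PySem.Chars.upperChar d))
        (List.map PySem.Chars.upperChar ds) ≠ [] := by simp
    cases hl : (List.scanl pvMove (pvMove (r, c) (PySem.Chars.upperChar d))
        (List.map PySem.Chars.upperChar ds)).getLast? with
    | none => exact absurd (List.getLast?_eq_none_iff.mp hl) hne
    | some p => simp [List.getLastD_eq_getLast?, hl]

theorem build_bridge_py_eq_alt (coord : List Int) (field : List (List Int)) (pattern : String) (value : Int) :
    build_bridge_py coord field pattern value = build_bridge_py_alt coord field pattern value := by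
  simp only [build_bridge_py, build_bridge_py_alt, pvLoopA]
  have hne : (((pattern.toList.map PySem.Chars.upperChar).scanl pvMove
      (PySem.List.pyGetD coord 0 0, PySem.List.pyGetD coord 1 0))) ≠ [] := by
    simp
  simp [List.getLastD_eq_getLast?]

-- ===== VERDICT (by name: the statement is the Claim_ definition above) =====
theorem build_bridge_py_spec : Claim_equal_build_bridge_py := by
  intro coord field pattern value _ _
  exact build_bridge_py_eq_alt coord field pattern value
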